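-- pv_equiv track=rewrite | github.com/nhadatxuyenmocbrvt/automated-trading-system | data_collectors/news_collector/crypto_news_scraper.py | group_articles_by_source
-- ===== SOURCE A (Python) =====
-- from typing import Dict, List, Any, Optional, Union, Tuple
--
-- def group_articles_by_source(articles: List[Dict[str, Any]]) -> Dict[str, List[Dict[str, Any]]]:
--     """
--     Nhóm bài viết theo nguồn.
--
--     Args:
--         articles: Danh sách bài viết
--
--     Returns:
--         Từ điển với khóa là tên nguồn và giá trị là danh sách bài viết
--     """
--     grouped = {}
--
--     for article in articles:
--         source = article.get('source', 'Unknown')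
--         if source not in grouped:
--             grouped[source] = []
--         grouped[source].append(article)
--
--     return grouped
-- ===== SOURCE B (Python) =====
-- def group_articles_by_source(articles):
--     """Group articles by source: distinct sources in first-appearance order,
--     then one stable filtering scan per source."""
--     keys = list(dict.fromkeys(a.get('source', 'Unknown') for a in articles))
--     return {src: [a for a in articles if a.get('source', 'Unknown') == src]
--             for src in keys}
-- ===== Notes on version B (the rewrite author's own statement) =====
-- stated objective: alternative
-- what changed: Replaces the single accumulating dict pass with a distinct-keys pass (dict.fromkeys) followed by one stable filtering scan of the article list per source, built as a dict comprehension.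
import Mathlib
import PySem

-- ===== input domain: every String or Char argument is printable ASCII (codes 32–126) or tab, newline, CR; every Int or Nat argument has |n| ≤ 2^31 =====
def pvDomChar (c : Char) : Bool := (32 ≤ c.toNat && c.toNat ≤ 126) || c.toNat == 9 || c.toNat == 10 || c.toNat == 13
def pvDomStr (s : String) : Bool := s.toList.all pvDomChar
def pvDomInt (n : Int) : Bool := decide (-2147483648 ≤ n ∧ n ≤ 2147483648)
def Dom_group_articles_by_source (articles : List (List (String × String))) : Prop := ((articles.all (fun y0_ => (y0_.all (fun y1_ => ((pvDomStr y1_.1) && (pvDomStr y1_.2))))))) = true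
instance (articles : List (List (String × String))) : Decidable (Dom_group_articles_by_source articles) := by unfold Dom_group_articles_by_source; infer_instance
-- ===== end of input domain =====

-- B replaces A's single accumulating dict pass with a distinct-source pass followed by one stable filtering scan per source (alternative decomposition, same results).


-- ===== PORT A =====
-- article.get('source', 'Unknown') on the assoc-list dict
def pvGetSource (article : List (String × String)) : String :=
  (PySem.Dict.mk article).getD "source" "Unknown"

-- A: one accumulating pass over articles into a dict; the returned dict is its items list
def group_articles_by_source (articles : List (List (String × String))) : List (String × List (List (String × String))) :=
  (articles.foldl
    (fun (grouped : PySem.Dict String (List (List (String × String)))) article =>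
      let source := pvGetSource article
      let grouped := if grouped.contains source = false then grouped.insert source [] else grouped
      grouped.modify source [] (fun l => l ++ [article]))
    PySem.Dict.empty).items

-- ===== PORT B =====
-- B: distinct source keys in first-appearance order, then one filtering scan per key
def group_articles_by_source_alt (articles : List (List (String × String))) : List (String × List (List (String × String))) :=
  let keys := PySem.List.dedup (articles.map (fun a => pvGetSource a))
  keys.map (fun src => (src, articles.filter (fun a => pvGetSource a == src)))

-- ===== PRECONDITION & SPEC =====
def Spec_group_articles_by_source (articles : List (List (String × String))) (out : List (String × List (List (String × String)))) : Prop := out = group_articles_by_source_alt articles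
instance (articles : List (List (String × String))) (out : List (String × List (List (String × String)))) : Decidable (Spec_group_articles_by_source articles out) := by unfold Spec_group_articles_by_source; infer_instance

-- ===== CLAIM (what is proved, stated in full; the proofs are below) =====
def Claim_equal_group_articles_by_source : Prop := ∀ (articles : List (List (String × String))), Dom_group_articles_by_source articles → Spec_group_articles_by_source articles (group_articles_by_source articles)

-- ===== LEMMAS AND PROOFS =====

-- ===== VERDICT (by name: the statement is the Claim_ definition above) =====
-- A's loop body (insert-if-new then append) is exactly a modify with default []
theorem pv_step_eq_modify (d : PySem.Dict String (List (List (String × String)))) (article : List (String × String)) (s : String) :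
    (let g := if d.contains s = false then d.insert s [] else d
     g.modify s [] (fun l => l ++ [article])) = d.modify s [] (fun l => l ++ [article]) := by
  by_cases h : d.contains s = false
  · simp only [h, if_pos]
    simp [PySem.Dict.modify, PySem.Dict.getD_insert_self, PySem.Dict.insert_insert_self,
      PySem.Dict.getD_of_not_contains _ _ h]
  · simp [h]

theorem pv_foldl_eq (articles : List (List (String × String))) :
    (articles.foldl
      (fun (grouped : PySem.Dict String (List (List (String × String)))) article =>
        let source := pvGetSource article
        let grouped := if grouped.contains source = false then grouped.insert source [] else grouped
        grouped.modify source [] (fun l => l ++ [article]))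
      PySem.Dict.empty)
    = (articles.map (fun a => (pvGetSource a, a))).foldl
        (fun d p => d.modify p.1 [] (fun l => l ++ [p.2])) PySem.Dict.empty := by
  rw [List.foldl_map]
  apply PySem.List.foldl_congr_mem
  intro d a _
  exact pv_step_eq_modify d a (pvGetSource a)

theorem group_articles_by_source_spec : Claim_equal_group_articles_by_source := by
  intro articles _
  unfold Spec_group_articles_by_source group_articles_by_source group_articles_by_source_alt
  rw [pv_foldl_eq]
  set l := articles.map (fun a => (pvGetSource a, a)) with hl
  have hnd : ((l.foldl (fun d p => d.modify p.1 [] (fun t => t ++ [p.2])) PySem.Dict.empty).keys).Nodup := by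
    exact PySem.Dict.nodup_keys_foldl_modify_key l (fun p => p.1) [] (fun _ p t => t ++ [p.2]) _ (by simp [PySem.Dict.keys_empty])
  rw [PySem.Dict.items_eq_map_keys _ hnd []]
  have hkeys : (l.foldl (fun d p => d.modify p.1 [] (fun t => t ++ [p.2])) PySem.Dict.empty).keys
      = PySem.List.dedup (articles.map (fun a => pvGetSource a)) := by
    rw [PySem.Dict.keys_foldl_modify_key]
    simp only [PySem.Dict.keys_empty, PySem.Set.update_nil_left, hl, List.map_map]
    simp [PySem.List.dedup_eq_ofList, Function.comp_def]
  rw [hkeys]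
  apply List.map_congr_left
  intro src _
  rw [PySem.Dict.getD_foldl_modify_append, PySem.Dict.getD_empty]
  simp [hl, List.filter_map, List.map_map, Function.comp_def]
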